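-- pv_equiv track=rewrite | github.com/ProyectoPIONERA/Validation-Environment | validation/ui/reporting.py | _combine_suite_status
-- ===== SOURCE A (Python) =====
-- from typing import Any, Dict, Iterable, List, Sequence
--
-- def _combine_suite_status(results: Sequence[Dict[str, Any]]) -> str:
--     if not results:
--         return "not_run"
--     statuses = [str((item or {}).get("status") or "").lower() for item in results]
--     if any(status == "failed" for status in statuses):
--         return "failed"
--     if any(status == "passed" for status in statuses):
--         return "passed"
--     if any(status == "skipped" for status in statuses):
--         return "skipped"
--     return "not_run"
-- ===== SOURCE B (Python) =====
-- # B: one pass tracking the minimum severity rank instead of three ordered any-scans.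
-- _RANK = {"failed": 0, "passed": 1, "skipped": 2}
-- _NAME = ("failed", "passed", "skipped", "not_run")
--
--
-- def _combine_suite_status(results):
--     best = 3
--     for item in results:
--         status = str((item or {}).get("status") or "").lower()
--         best = min(best, _RANK.get(status, 3))
--     return _NAME[best]
-- ===== Notes on version B (the rewrite author's own statement) =====
-- stated objective: simpler
-- what changed: Replaces the build-a-list-of-statuses plus three ordered any() scans (and the empty-input special case) with a single fold that tracks the minimum severity rank and maps it back to a name at the end.
import Mathlib
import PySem

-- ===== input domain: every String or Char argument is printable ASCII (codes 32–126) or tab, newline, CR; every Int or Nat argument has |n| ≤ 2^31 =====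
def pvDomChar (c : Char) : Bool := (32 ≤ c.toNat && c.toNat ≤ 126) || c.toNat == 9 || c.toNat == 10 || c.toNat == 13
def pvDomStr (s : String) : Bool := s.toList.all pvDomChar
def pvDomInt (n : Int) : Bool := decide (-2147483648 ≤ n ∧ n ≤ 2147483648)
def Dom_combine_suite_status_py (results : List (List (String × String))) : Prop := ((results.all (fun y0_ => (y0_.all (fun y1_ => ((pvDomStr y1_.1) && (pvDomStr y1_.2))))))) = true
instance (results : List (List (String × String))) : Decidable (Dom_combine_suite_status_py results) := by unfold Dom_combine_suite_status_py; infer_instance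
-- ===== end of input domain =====

-- B changes the decomposition only: one min-rank fold instead of a status list plus three ordered any-scans (objective: simpler).

-- ===== PORT A =====
-- str((item or {}).get("status") or "").lower() : dict.get = first match in the assoc list;
-- the value is a string, so str(·) is identity and '· or ""' maps "" to "" (identity on strings).
def pvNormStatus (item : List (String × String)) : String :=
  PySem.Str.lower ((item.lookup "status").getD "")

def combine_suite_status_py (results : List (List (String × String))) : String :=
  if results = [] then "not_run"
  else
    let statuses := results.map pvNormStatus
    if statuses.any (· == "failed") then "failed"
    else if statuses.any (· == "passed") then "passed"
    else if statuses.any (· == "skipped") then "skipped"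
    else "not_run"

-- ===== PORT B =====
-- _RANK.get(status, 3)
def pvRank (s : String) : Nat :=
  if s = "failed" then 0 else if s = "passed" then 1 else if s = "skipped" then 2 else 3

def combine_suite_status_py_alt (results : List (List (String × String))) : String :=
  let best := results.foldl (fun b item => min b (pvRank (pvNormStatus item))) 3
  -- _NAME[best]; best is always one of 0,1,2,3
  match best with
  | 0 => "failed"
  | 1 => "passed"
  | 2 => "skipped"
  | _ => "not_run"

-- ===== PRECONDITION & SPEC =====
def Spec_combine_suite_status_py (results : List (List (String × String))) (out : String) : Prop := out = combine_suite_status_py_alt results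
instance (results : List (List (String × String))) (out : String) : Decidable (Spec_combine_suite_status_py results out) := by unfold Spec_combine_suite_status_py; infer_instance

-- ===== CLAIM (what is proved, stated in full; the proofs are below) =====
def Claim_equal_combine_suite_status_py : Prop := ∀ (results : List (List (String × String))), Dom_combine_suite_status_py results → Spec_combine_suite_status_py results (combine_suite_status_py results)

-- ===== LEMMAS AND PROOFS =====

/-- A's answer as a rank, computed from a list of (already normalized) statuses. -/
def pvSev (l : List String) : Nat :=
  if l.any (· == "failed") then 0
  else if l.any (· == "passed") then 1
  else if l.any (· == "skipped") then 2
  else 3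

lemma pvSev_le (l : List String) : pvSev l ≤ 3 := by
  unfold pvSev; split_ifs <;> omega

lemma pvSev_cons (s : String) (l : List String) :
    pvSev (s :: l) = min (pvRank s) (pvSev l) := by
  unfold pvSev pvRank
  simp only [List.any_cons, Bool.or_eq_true, beq_iff_eq]
  split_ifs <;> simp_all

lemma pvFold_eq (l : List String) (b : Nat) (hb : b ≤ 3) :
    l.foldl (fun a s => min a (pvRank s)) b = min b (pvSev l) := by
  induction l generalizing b with
  | nil =>
    simp [pvSev, Nat.min_eq_left hb]
  | cons s l ih =>
    rw [List.foldl_cons, ih _ (le_trans (Nat.min_le_left _ _) hb), pvSev_cons]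
    omega

-- ===== VERDICT (by name: the statement is the Claim_ definition above) =====
theorem combine_suite_status_py_spec : Claim_equal_combine_suite_status_py := by
  intro results _
  unfold Spec_combine_suite_status_py combine_suite_status_py combine_suite_status_py_alt
  have hfold : results.foldl (fun b item => min b (pvRank (pvNormStatus item))) 3
      = pvSev (results.map pvNormStatus) := by
    have h1 : results.foldl (fun b item => min b (pvRank (pvNormStatus item))) 3
          = (results.map pvNormStatus).foldl (fun a s => min a (pvRank s)) 3 := by
      rw [List.foldl_map]
    rw [h1, pvFold_eq _ _ (le_refl 3)]
    exact Nat.min_eq_right (pvSev_le _)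
  rw [hfold]
  rcases results with _ | ⟨x, xs⟩
  · simp [pvSev]
  · simp only [if_neg (List.cons_ne_nil x xs)]
    unfold pvSev
    split_ifs <;> rfl
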